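-- pv_equiv track=rewrite | github.com/johnmarktaylor91/torchlens | torchlens/flops.py | compute_rnn_flops
-- ===== SOURCE A (Python) =====
-- from typing import Optional, Dict, Any, List, Tuple, Union
--
-- def compute_rnn_flops(
--     input_shape: Tuple[int, ...],
--     hidden_size: int,
--     num_layers: int = 1,
--     bidirectional: bool = False,
--     rnn_type: str = "rnn"
-- ) -> int:
--     """
--     Compute FLOPs for RNN/LSTM/GRU.
--
--     RNN cell: h_t = tanh(W_ih @ x_t + W_hh @ h_{t-1} + b)
--     - FLOPs per timestep = 2 * (input_size * hidden_size + hidden_size * hidden_size) + hidden_size * 5 (tanh)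
--
--     LSTM has 4 gates, GRU has 3 gates.
--     """
--     if len(input_shape) < 2:
--         return 0
--
--     # input_shape: [seq_len, batch, input_size] or [batch, seq_len, input_size]
--     if len(input_shape) == 3:
--         seq_len = input_shape[0]
--         batch = input_shape[1]
--         input_size = input_shape[2]
--     else:
--         seq_len = 1
--         batch = input_shape[0]
--         input_size = input_shape[-1]
--
--     num_directions = 2 if bidirectional else 1
--
--     # Gate multiplier: RNN=1, LSTM=4, GRU=3
--     gate_mult = {"rnn": 1, "lstm": 4, "gru": 3}.get(rnn_type.lower(), 1)
--
--     flops_per_cell = 0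
--
--     for layer in range(num_layers):
--         layer_input_size = input_size if layer == 0 else hidden_size * num_directions
--
--         # Input-hidden transformation: W_ih @ x
--         flops_per_cell += 2 * layer_input_size * hidden_size * gate_mult
--
--         # Hidden-hidden transformation: W_hh @ h
--         flops_per_cell += 2 * hidden_size * hidden_size * gate_mult
--
--         # Bias additions
--         flops_per_cell += 2 * hidden_size * gate_mult
--
--         # Activation functions
--         if rnn_type.lower() == "lstm":
--             # 4 gates: 3 sigmoid + 1 tanh + element-wise ops
--             flops_per_cell += hidden_size * (3 * 3 + 5 + 4)  # sigmoid=3, tanh=5, element-wise=4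
--         elif rnn_type.lower() == "gru":
--             # 3 gates: 2 sigmoid + 1 tanh + element-wise ops
--             flops_per_cell += hidden_size * (2 * 3 + 5 + 3)
--         else:
--             # Simple RNN: 1 tanh
--             flops_per_cell += hidden_size * 5
--
--     total_flops = flops_per_cell * seq_len * batch * num_directions
--
--     return total_flops
-- ===== SOURCE B (Python) =====
-- def compute_rnn_flops(
--     input_shape,
--     hidden_size,
--     num_layers=1,
--     bidirectional=False,
--     rnn_type="rnn",
-- ):
--     # Closed form: the loop's per-layer cost is constant except for layer 0.
--     if len(input_shape) < 2:
--         return 0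
--     if len(input_shape) == 3:
--         seq_len, batch, input_size = input_shape[0], input_shape[1], input_shape[2]
--     else:
--         seq_len, batch, input_size = 1, input_shape[0], input_shape[-1]
--     num_directions = 2 if bidirectional else 1
--     kind = rnn_type.lower()
--     gate_mult = {"rnn": 1, "lstm": 4, "gru": 3}.get(kind, 1)
--     act = 18 if kind == "lstm" else 14 if kind == "gru" else 5
--     n = max(0, num_layers)
--     per_layer = 2 * hidden_size * hidden_size * gate_mult + 2 * hidden_size * gate_mult + act * hidden_size
--     flops_per_cell = n * per_layer
--     if n >= 1:
--         flops_per_cell += 2 * input_size * hidden_size * gate_mult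
--         flops_per_cell += (n - 1) * 2 * (hidden_size * num_directions) * hidden_size * gate_mult
--     return flops_per_cell * seq_len * batch * num_directions
-- ===== Notes on version B (the rewrite author's own statement) =====
-- stated objective: faster
-- what changed: Replaced the per-layer accumulation loop with a closed-form formula: n*per_layer_common plus the layer-0 input term and (n-1) inter-layer terms, since every layer after the first contributes the same constant.
import Mathlib
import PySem

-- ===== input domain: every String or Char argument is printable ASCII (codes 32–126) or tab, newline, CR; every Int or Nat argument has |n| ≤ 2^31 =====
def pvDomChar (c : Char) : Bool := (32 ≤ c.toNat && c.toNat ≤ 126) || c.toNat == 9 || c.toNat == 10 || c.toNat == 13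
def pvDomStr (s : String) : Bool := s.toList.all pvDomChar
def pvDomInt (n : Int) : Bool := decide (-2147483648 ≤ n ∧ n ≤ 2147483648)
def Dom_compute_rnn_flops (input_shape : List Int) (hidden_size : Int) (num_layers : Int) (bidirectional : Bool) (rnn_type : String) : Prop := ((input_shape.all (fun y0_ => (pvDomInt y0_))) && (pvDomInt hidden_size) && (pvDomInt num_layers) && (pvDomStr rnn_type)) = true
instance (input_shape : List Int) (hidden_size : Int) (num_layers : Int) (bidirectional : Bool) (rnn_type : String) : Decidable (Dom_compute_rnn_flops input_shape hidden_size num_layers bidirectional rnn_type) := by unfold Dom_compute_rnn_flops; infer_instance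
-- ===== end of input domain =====

-- B replaces A's per-layer accumulation loop with a closed-form formula (simpler); return values agree on all inputs.

-- ===== PORT A =====
-- the body of A's 'for layer in range(num_layers)' loop, step for step (acc = flops_per_cell)
def rnnLoopBody (input_size hidden_size num_directions gate_mult : Int) (rnn_type : String) (acc layer : Int) : Int :=
  let layer_input_size : Int := if layer = 0 then input_size else hidden_size * num_directions
  let acc := acc + 2 * layer_input_size * hidden_size * gate_mult
  let acc := acc + 2 * hidden_size * hidden_size * gate_mult
  let acc := acc + 2 * hidden_size * gate_mult
  if PySem.Str.lower rnn_type = "lstm" then acc + hidden_size * (3 * 3 + 5 + 4)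
  else if PySem.Str.lower rnn_type = "gru" then acc + hidden_size * (2 * 3 + 5 + 3)
  else acc + hidden_size * 5

-- indexing uses pyGetD: every index A reads (0, 1, 2, -1) is in range once len(input_shape) ≥ 2, so the default is never used
def compute_rnn_flops (input_shape : List Int) (hidden_size : Int) (num_layers : Int) (bidirectional : Bool) (rnn_type : String) : Int :=
  if input_shape.length < 2 then 0
  else
    let seq_len : Int := if input_shape.length = 3 then PySem.List.pyGetD input_shape 0 0 else 1
    let batch : Int := if input_shape.length = 3 then PySem.List.pyGetD input_shape 1 0 else PySem.List.pyGetD input_shape 0 0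
    let input_size : Int := if input_shape.length = 3 then PySem.List.pyGetD input_shape 2 0 else PySem.List.pyGetD input_shape (-1) 0
    let num_directions : Int := if bidirectional then 2 else 1
    let gate_mult : Int := (PySem.Dict.ofList [("rnn", (1:Int)), ("lstm", 4), ("gru", 3)]).getD (PySem.Str.lower rnn_type) 1
    let flops_per_cell : Int := (PySem.List.pyRange 0 num_layers 1).foldl
      (rnnLoopBody input_size hidden_size num_directions gate_mult rnn_type) 0
    flops_per_cell * seq_len * batch * num_directions

-- ===== PORT B =====
def compute_rnn_flops_alt (input_shape : List Int) (hidden_size : Int) (num_layers : Int) (bidirectional : Bool) (rnn_type : String) : Int :=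
  if input_shape.length < 2 then 0
  else
    let seq_len : Int := if input_shape.length = 3 then PySem.List.pyGetD input_shape 0 0 else 1
    let batch : Int := if input_shape.length = 3 then PySem.List.pyGetD input_shape 1 0 else PySem.List.pyGetD input_shape 0 0
    let input_size : Int := if input_shape.length = 3 then PySem.List.pyGetD input_shape 2 0 else PySem.List.pyGetD input_shape (-1) 0
    let num_directions : Int := if bidirectional then 2 else 1
    let kind := PySem.Str.lower rnn_type
    let gate_mult : Int := (PySem.Dict.ofList [("rnn", (1:Int)), ("lstm", 4), ("gru", 3)]).getD kind 1
    let act : Int := if kind = "lstm" then 18 else if kind = "gru" then 14 else 5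
    let n : Int := max 0 num_layers
    let per_layer : Int := 2 * hidden_size * hidden_size * gate_mult + 2 * hidden_size * gate_mult + act * hidden_size
    let flops_per_cell : Int :=
      n * per_layer +
      (if 1 ≤ n then
        2 * input_size * hidden_size * gate_mult +
        (n - 1) * 2 * (hidden_size * num_directions) * hidden_size * gate_mult
      else 0)
    flops_per_cell * seq_len * batch * num_directions

-- ===== PRECONDITION & SPEC =====
def Spec_compute_rnn_flops (input_shape : List Int) (hidden_size : Int) (num_layers : Int) (bidirectional : Bool) (rnn_type : String) (out : Int) : Prop := out = compute_rnn_flops_alt input_shape hidden_size num_layers bidirectional rnn_type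
instance (input_shape : List Int) (hidden_size : Int) (num_layers : Int) (bidirectional : Bool) (rnn_type : String) (out : Int) : Decidable (Spec_compute_rnn_flops input_shape hidden_size num_layers bidirectional rnn_type out) := by unfold Spec_compute_rnn_flops; infer_instance

-- ===== CLAIM (what is proved, stated in full; the proofs are below) =====
def Claim_equal_compute_rnn_flops : Prop := ∀ (input_shape : List Int) (hidden_size : Int) (num_layers : Int) (bidirectional : Bool) (rnn_type : String), Dom_compute_rnn_flops input_shape hidden_size num_layers bidirectional rnn_type → Spec_compute_rnn_flops input_shape hidden_size num_layers bidirectional rnn_type (compute_rnn_flops input_shape hidden_size num_layers bidirectional rnn_type)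

-- ===== LEMMAS AND PROOFS =====

-- A's loop body adds a layer-dependent step to the accumulator
def rnnStep (input_size hidden_size num_directions gate_mult act : Int) (layer : Int) : Int :=
  2 * (if layer = 0 then input_size else hidden_size * num_directions) * hidden_size * gate_mult
    + 2 * hidden_size * hidden_size * gate_mult + 2 * hidden_size * gate_mult + act * hidden_size

theorem rnnLoopBody_eq_add_step (inp hs nd g : Int) (rt : String) (acc layer : Int) :
    rnnLoopBody inp hs nd g rt acc layer
      = acc + rnnStep inp hs nd g
          (if PySem.Str.lower rt = "lstm" then 18 else if PySem.Str.lower rt = "gru" then 14 else 5) layer := by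
  unfold rnnLoopBody rnnStep
  split_ifs <;> ring

theorem foldl_add_step_sum (s : Int → Int) (L : List Int) (init : Int) :
    L.foldl (fun acc l => acc + s l) init = init + (L.map s).sum := by
  induction L generalizing init with
  | nil => simp
  | cons x L ih => simp [List.foldl_cons, ih]; ring

theorem sum_step_pyRange (inp hs nd g act n : Int) :
    ((PySem.List.pyRange 0 n 1).map (rnnStep inp hs nd g act)).sum
      = (max 0 n) * (2 * hs * hs * g + 2 * hs * g + act * hs)
        + (if 1 ≤ max 0 n then
             2 * inp * hs * g + (max 0 n - 1) * 2 * (hs * nd) * hs * g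
           else 0) := by
  by_cases hn : 1 ≤ n
  · have hmax : max 0 n = n := by omega
    rw [PySem.List.pyRange_one_cons (by omega : (0:Int) < n)]
    have htail : (PySem.List.pyRange (0+1) n 1).map (rnnStep inp hs nd g act)
        = (PySem.List.pyRange (0+1) n 1).map (fun _ =>
            2 * (hs * nd) * hs * g + 2 * hs * hs * g + 2 * hs * g + act * hs) := by
      apply List.map_congr_left
      intro l hl
      have : (1:Int) ≤ l := (PySem.List.mem_pyRange_one.mp hl).1
      unfold rnnStep
      have hl0 : ¬ (l = 0) := by omega
      simp [hl0]
    rw [List.map_cons, List.sum_cons, htail, PySem.List.sum_map_const_int,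
        PySem.List.length_pyRange_one]
    have hcast : ((n - (0+1)).toNat : Int) = n - 1 := by omega
    rw [hcast]
    unfold rnnStep
    simp [hmax, hn]
    ring
  · have h0 : max 0 n = 0 := by omega
    rw [PySem.List.pyRange_one_eq_nil (by omega : n ≤ 0)]
    simp [h0]

theorem compute_rnn_flops_spec : Claim_equal_compute_rnn_flops := by
  intro input_shape hidden_size num_layers bidirectional rnn_type _
  unfold Spec_compute_rnn_flops compute_rnn_flops compute_rnn_flops_alt
  by_cases hlen : input_shape.length < 2
  · simp [hlen]
  · simp only [hlen, if_false]
    have hbody : (rnnLoopBody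
        (if input_shape.length = 3 then PySem.List.pyGetD input_shape 2 0 else PySem.List.pyGetD input_shape (-1) 0)
        hidden_size (if bidirectional then 2 else 1)
        ((PySem.Dict.ofList [("rnn", (1:Int)), ("lstm", 4), ("gru", 3)]).getD (PySem.Str.lower rnn_type) 1)
        rnn_type)
        = (fun acc l => acc + rnnStep
            (if input_shape.length = 3 then PySem.List.pyGetD input_shape 2 0 else PySem.List.pyGetD input_shape (-1) 0)
            hidden_size (if bidirectional then 2 else 1)
            ((PySem.Dict.ofList [("rnn", (1:Int)), ("lstm", 4), ("gru", 3)]).getD (PySem.Str.lower rnn_type) 1)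
            (if PySem.Str.lower rnn_type = "lstm" then 18 else if PySem.Str.lower rnn_type = "gru" then 14 else 5) l) := by
      funext acc l
      exact rnnLoopBody_eq_add_step _ _ _ _ _ acc l
    rw [hbody, foldl_add_step_sum, sum_step_pyRange]
    ring
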